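-- pv_equiv track=rewrite | github.com/heimgewebe/tools | repomergers/hauski-merger.py | summarize_ext
-- ===== SOURCE A (Python) =====
-- def summarize_ext(manifest_rows):
--     """
--     manifest_rows: Liste von (rel:Path, size:int, md5:str, cat:str, ext:str)
--     -> (ext_counts, ext_sizes)
--     """
--     counts: dict[str, int] = {}
--     sizes: dict[str, int] = {}
--     for rel, sz, md5, cat, ext in manifest_rows:
--         key = ext or "<none>"
--         counts[key] = counts.get(key, 0) + 1
--         sizes[key] = sizes.get(key, 0) + sz
--     return counts, sizes
-- ===== SOURCE B (Python) =====
-- def summarize_ext(manifest_rows):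
--     """
--     manifest_rows: Liste von (rel:Path, size:int, md5:str, cat:str, ext:str)
--     -> (ext_counts, ext_sizes)
--     """
--     keyed = [(ext or "<none>", sz) for rel, sz, md5, cat, ext in manifest_rows]
--     keys = list(dict.fromkeys(k for k, _ in keyed))
--     counts = {k: sum(1 for kk, _ in keyed if kk == k) for k in keys}
--     sizes = {k: sum(s for kk, s in keyed if kk == k) for k in keys}
--     return counts, sizes
-- ===== Notes on version B (the rewrite author's own statement) =====
-- stated objective: alternative
-- what changed: Replaces A's single incremental pass updating two dicts with a two-phase group-by: normalize (key, size) pairs, dedup the keys in first-occurrence order, then build each dict by a per-key scan (count / sum) over the pairs.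
import Mathlib
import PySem

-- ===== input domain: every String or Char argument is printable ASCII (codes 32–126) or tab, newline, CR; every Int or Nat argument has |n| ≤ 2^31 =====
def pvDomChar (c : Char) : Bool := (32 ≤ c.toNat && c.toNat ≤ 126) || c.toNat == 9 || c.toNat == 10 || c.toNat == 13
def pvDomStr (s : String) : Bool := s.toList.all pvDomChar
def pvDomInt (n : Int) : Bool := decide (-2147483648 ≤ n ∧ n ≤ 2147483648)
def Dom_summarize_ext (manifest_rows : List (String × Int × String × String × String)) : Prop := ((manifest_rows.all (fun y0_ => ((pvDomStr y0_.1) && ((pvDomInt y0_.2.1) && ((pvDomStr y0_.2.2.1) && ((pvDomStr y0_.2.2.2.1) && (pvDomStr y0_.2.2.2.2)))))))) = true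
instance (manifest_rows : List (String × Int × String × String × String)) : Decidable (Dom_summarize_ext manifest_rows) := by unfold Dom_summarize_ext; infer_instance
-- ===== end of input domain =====

-- B replaces A's incremental dict-updating pass with a dedup-keys-then-scan-per-key group-by (alternative decomposition, not faster).

-- ===== PORT A =====
-- 'ext or "<none>"' : the empty string is the only falsy str
def pvKey (ext : String) : String := if ext = "" then "<none>" else ext

def summarize_ext (manifest_rows : List (String × Int × String × String × String)) : (List (String × Int)) × (List (String × Int)) :=
  let st := manifest_rows.foldl
    (fun (st : PySem.Dict String Int × PySem.Dict String Int) row =>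
      (st.1.insert (pvKey row.2.2.2.2) (st.1.getD (pvKey row.2.2.2.2) 0 + 1),
       st.2.insert (pvKey row.2.2.2.2) (st.2.getD (pvKey row.2.2.2.2) 0 + row.2.1)))
    (PySem.Dict.empty, PySem.Dict.empty)
  (st.1.items, st.2.items)

-- ===== PORT B =====
def summarize_ext_alt (manifest_rows : List (String × Int × String × String × String)) : (List (String × Int)) × (List (String × Int)) :=
  let keyed := manifest_rows.map (fun row => (pvKey row.2.2.2.2, row.2.1))
  let keys := PySem.List.dedup (keyed.map (·.1))
  (keys.map (fun k => (k, (keyed.countP (fun p => p.1 == k) : Int))),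
   keys.map (fun k => (k, ((keyed.filter (fun p => p.1 == k)).map (·.2)).sum)))

-- ===== PRECONDITION & SPEC =====
def Spec_summarize_ext (manifest_rows : List (String × Int × String × String × String)) (out : (List (String × Int)) × (List (String × Int))) : Prop := out = summarize_ext_alt manifest_rows
instance (manifest_rows : List (String × Int × String × String × String)) (out : (List (String × Int)) × (List (String × Int))) : Decidable (Spec_summarize_ext manifest_rows out) := by unfold Spec_summarize_ext; infer_instance

-- ===== CLAIM (what is proved, stated in full; the proofs are below) =====
def Claim_equal_summarize_ext : Prop := ∀ (manifest_rows : List (String × Int × String × String × String)), Dom_summarize_ext manifest_rows → Spec_summarize_ext manifest_rows (summarize_ext manifest_rows)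

-- ===== LEMMAS AND PROOFS =====

-- value of A's insert/getD accumulation loop at any key
lemma getD_foldl_insert_key_add {α : Type} (l : List α) (key : α → String) (g : α → Int)
    (d : PySem.Dict String Int) (k : String) :
    (l.foldl (fun d a => d.insert (key a) (d.getD (key a) 0 + g a)) d).getD k 0
      = d.getD k 0 + ((l.filter (fun a => key a == k)).map g).sum := by
  induction l generalizing d with
  | nil => simp
  | cons a t ih =>
    simp only [List.foldl_cons, List.filter_cons, ih]
    rw [PySem.Dict.getD_insert]
    by_cases h : key a = k
    · simp [h]; omega
    · simp [h, Ne.symm h]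

-- A's loop over a pair of dicts is two independent loops
lemma foldl_split (rows : List (String × Int × String × String × String)) :
    rows.foldl
      (fun (st : PySem.Dict String Int × PySem.Dict String Int) row =>
        (st.1.insert (pvKey row.2.2.2.2) (st.1.getD (pvKey row.2.2.2.2) 0 + 1),
         st.2.insert (pvKey row.2.2.2.2) (st.2.getD (pvKey row.2.2.2.2) 0 + row.2.1)))
      (PySem.Dict.empty, PySem.Dict.empty)
    = (rows.foldl (fun d row => d.insert (pvKey row.2.2.2.2) (d.getD (pvKey row.2.2.2.2) 0 + 1)) PySem.Dict.empty,
       rows.foldl (fun d row => d.insert (pvKey row.2.2.2.2) (d.getD (pvKey row.2.2.2.2) 0 + row.2.1)) PySem.Dict.empty) := by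
  suffices h : ∀ (a b : PySem.Dict String Int),
      rows.foldl
        (fun (st : PySem.Dict String Int × PySem.Dict String Int) row =>
          (st.1.insert (pvKey row.2.2.2.2) (st.1.getD (pvKey row.2.2.2.2) 0 + 1),
           st.2.insert (pvKey row.2.2.2.2) (st.2.getD (pvKey row.2.2.2.2) 0 + row.2.1))) (a, b)
      = (rows.foldl (fun d row => d.insert (pvKey row.2.2.2.2) (d.getD (pvKey row.2.2.2.2) 0 + 1)) a,
         rows.foldl (fun d row => d.insert (pvKey row.2.2.2.2) (d.getD (pvKey row.2.2.2.2) 0 + row.2.1)) b) from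
    h _ _
  induction rows with
  | nil => intro a b; rfl
  | cons r t ih => intro a b; simpa using ih _ _

theorem summarize_ext_spec : Claim_equal_summarize_ext := by
  intro rows _
  unfold Spec_summarize_ext summarize_ext summarize_ext_alt
  dsimp only
  rw [foldl_split]
  simp only [Prod.mk.injEq]
  have hkeys : ∀ (f : PySem.Dict String Int → (String × Int × String × String × String) → Int),
      (rows.foldl (fun d row => PySem.Dict.insert d (pvKey row.2.2.2.2) (f d row)) PySem.Dict.empty).keys
        = PySem.List.dedup (rows.map (fun row => pvKey row.2.2.2.2)) := by
    intro f
    rw [PySem.Dict.keys_foldl_insert_key]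
    simp [PySem.Dict.keys_empty, PySem.List.dedup_eq_ofList, PySem.Set.update, PySem.Set.ofList_eq_foldl]
  have hnd : ∀ (f : PySem.Dict String Int → (String × Int × String × String × String) → Int),
      (rows.foldl (fun d row => PySem.Dict.insert d (pvKey row.2.2.2.2) (f d row)) PySem.Dict.empty).keys.Nodup := by
    intro f
    exact PySem.Dict.nodup_keys_foldl_insert_key _ _ _ _ (by simp [PySem.Dict.keys_empty])
  constructor
  · rw [PySem.Dict.items_eq_map_keys _ (hnd _) 0, hkeys]
    simp only [List.map_map]
    apply List.map_congr_left
    intro k _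
    have := getD_foldl_insert_key_add rows (fun row => pvKey row.2.2.2.2) (fun _ => 1) PySem.Dict.empty k
    simp only at this
    rw [this]
    simp [List.countP_eq_length_filter, List.filter_map, Function.comp_def]
  · rw [PySem.Dict.items_eq_map_keys _ (hnd _) 0, hkeys]
    simp only [List.map_map]
    apply List.map_congr_left
    intro k _
    have := getD_foldl_insert_key_add rows (fun row => pvKey row.2.2.2.2) (fun row => row.2.1) PySem.Dict.empty k
    simp only at this
    rw [this]
    simp [List.filter_map, Function.comp_def, List.map_map]
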